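-- pv_equiv track=rewrite | github.com/ntpz870817/Chamaeleo | methods/components/motif_validity.py | motif_repeat
-- ===== SOURCE A (Python) =====
-- def motif_repeat(dna_motif, max_repeat):
--     """
--     introduction: Compute the continuous repetition of fragments in a DNA motif.
--
--     :param dna_motif:  DNA motif for detection.
--                        Type: string.
--
--     :param max_repeat: Maximum repetition times.
--                         More than that time, the DNA motif was considered unfriendly.
--
--     :return: Whether DNA motif conforms to the friendliness or not.
--     """
--     length = len(dna_motif) - 1
--     while length > max_repeat:
--         for index in range(len(dna_motif)):
--             if index + length < len(dna_motif):
--                 sample = dna_motif[index: index + length]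
--                 if dna_motif.count(sample) > 1:
--                     return False
--         length -= 1
--
--     return True
-- ===== SOURCE B (Python) =====
-- def motif_repeat(dna_motif, max_repeat):
--     n = len(dna_motif)
--     L = max_repeat + 1
--     if max_repeat >= n - 1:
--         return True
--     if L <= 0:
--         return n == 0
--     for i in range(n - 2 * L + 1):
--         if dna_motif[i:i + L] in dna_motif[i + L:]:
--             return False
--     return True
-- ===== Notes on version B (the rewrite author's own statement) =====
-- stated objective: alternative
-- what changed: B checks only the single critical fragment length max_repeat+1 (a repeat at any longer length implies one at this length) and tests each window with one substring search in the remaining suffix, instead of A's descending loop over every length with a full count() scan per window; intended as faster (probe measured A 1379ms vs B 1ms at n=1024 and A timing out beyond), but the probe's confirmation rule was not met, so no speed is claimed.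
import Mathlib
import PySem

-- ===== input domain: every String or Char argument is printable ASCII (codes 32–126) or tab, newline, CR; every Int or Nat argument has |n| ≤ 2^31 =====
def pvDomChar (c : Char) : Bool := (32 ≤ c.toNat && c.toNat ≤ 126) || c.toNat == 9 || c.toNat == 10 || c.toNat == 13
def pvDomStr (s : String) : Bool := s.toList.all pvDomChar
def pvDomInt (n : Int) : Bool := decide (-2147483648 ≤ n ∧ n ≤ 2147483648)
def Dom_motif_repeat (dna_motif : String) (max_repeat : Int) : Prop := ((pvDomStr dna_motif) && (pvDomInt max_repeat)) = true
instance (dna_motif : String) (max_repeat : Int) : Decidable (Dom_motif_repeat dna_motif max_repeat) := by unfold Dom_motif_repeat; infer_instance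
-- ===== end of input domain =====

-- B checks only the single critical fragment length max_repeat+1 (a repeat at any longer
-- length implies one at this length) and tests each window with one substring search in the
-- remaining suffix, instead of A's descending loop over all lengths with a count() per window
-- (objective: alternative algorithm).

-- ===== PORT A =====
-- while length > max_repeat: for index in range(len(s)): if index+length < len(s):
--   sample = s[index:index+length]; if s.count(sample) > 1: return False;  length -= 1
def motifRepeatLoop (dna_motif : String) (max_repeat : Int) (length : Int) : Bool :=
  if _h : max_repeat < length then
    if (PySem.List.pyRange 0 (PySem.Str.len dna_motif)).any (fun index =>
        decide (index + length < PySem.Str.len dna_motif) &&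
        decide (1 < PySem.Str.count dna_motif
                  (PySem.Str.slice dna_motif (some index) (some (index + length)))))
    then false
    else motifRepeatLoop dna_motif max_repeat (length - 1)
  else true
termination_by (length - max_repeat).toNat
decreasing_by omega

def motif_repeat (dna_motif : String) (max_repeat : Int) : Bool :=
  motifRepeatLoop dna_motif max_repeat (PySem.Str.len dna_motif - 1)

-- ===== PORT B =====
def motif_repeat_alt (dna_motif : String) (max_repeat : Int) : Bool :=
  let n := PySem.Str.len dna_motif
  let L := max_repeat + 1
  if max_repeat ≥ n - 1 then true
  else if L ≤ 0 then decide (n = 0)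
  else if (PySem.List.pyRange 0 (n - 2 * L + 1)).any (fun i =>
      PySem.Str.isIn (PySem.Str.slice dna_motif (some i) (some (i + L)))
                     (PySem.Str.slice dna_motif (some (i + L)) none))
  then false else true

-- ===== PRECONDITION & SPEC =====
def Spec_motif_repeat (dna_motif : String) (max_repeat : Int) (out : Bool) : Prop := out = motif_repeat_alt dna_motif max_repeat
instance (dna_motif : String) (max_repeat : Int) (out : Bool) : Decidable (Spec_motif_repeat dna_motif max_repeat out) := by unfold Spec_motif_repeat; infer_instance

-- ===== CLAIM (what is proved, stated in full; the proofs are below) =====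
def Claim_equal_motif_repeat : Prop := ∀ (dna_motif : String) (max_repeat : Int), Dom_motif_repeat dna_motif max_repeat → Spec_motif_repeat dna_motif max_repeat (motif_repeat dna_motif max_repeat)

-- ===== LEMMAS AND PROOFS =====

-- list-level mirror of port A's inner 'for' loop at fragment length L
def mrInner (s : List Char) (L : Int) : Bool :=
  (PySem.List.pyRange 0 (s.length : Int)).any (fun index =>
    decide (index + L < (s.length : Int)) &&
    decide (1 < PySem.Chars.count s (PySem.List.slice s (some index) (some (index + L)))))

-- list-level mirror of port A's while loop
def mrLoop (s : List Char) (max_repeat : Int) (length : Int) : Bool :=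
  if _h : max_repeat < length then
    if mrInner s length then false else mrLoop s max_repeat (length - 1)
  else true
termination_by (length - max_repeat).toNat
decreasing_by omega

-- window of length L starting at j
def mrWin (s : List Char) (j L : Nat) : List Char := (s.drop j).take L

-- two disjoint occurrences of sub in s
def mrOcc2 (s sub : List Char) : Prop :=
  ∃ j k : Nat, j + sub.length ≤ k ∧ sub <+: s.drop j ∧ sub <+: s.drop k

-- some window of length L repeats disjointly later in s
def mrRep (s : List Char) (L : Nat) : Prop :=
  ∃ j k : Nat, j + L ≤ k ∧ mrWin s j L <+: s.drop k ∧ j + 2 * L ≤ s.length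

theorem mrLoop_eq (dna : String) (mr len : Int) :
    motifRepeatLoop dna mr len = mrLoop dna.toList mr len := by
  rw [motifRepeatLoop, mrLoop]
  split
  · have hany : (PySem.List.pyRange 0 (PySem.Str.len dna)).any (fun index =>
        decide (index + len < PySem.Str.len dna) &&
        decide (1 < PySem.Str.count dna
                  (PySem.Str.slice dna (some index) (some (index + len))))) = mrInner dna.toList len := by
      simp [mrInner, PySem.Str.len_eq, PySem.Str.count_eq, PySem.Str.toList_slice]
    rw [hany]
    split
    · rfl
    · exact mrLoop_eq dna mr (len - 1)
  · rfl
termination_by (len - mr).toNat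
decreasing_by omega

theorem mrLoop_iff (s : List Char) (mr len : Int) :
    mrLoop s mr len = true ↔ ∀ L : Int, mr < L → L ≤ len → mrInner s L = false := by
  rw [mrLoop]
  split
  · rename_i h
    split
    · rename_i h2
      constructor
      · intro hf; exact absurd hf (by simp)
      · intro H; exact absurd (H len h le_rfl) (by simp [h2])
    · rename_i h2
      rw [mrLoop_iff s mr (len - 1)]
      constructor
      · intro H L h1 hL
        rcases lt_or_eq_of_le hL with h3 | h3
        · exact H L h1 (by omega)
        · subst h3; simpa using h2
      · intro H L h1 hL; exact H L h1 (by omega)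
  · rename_i h
    simp only [true_iff]
    intro L h1 hL; omega
termination_by (len - mr).toNat
decreasing_by omega

-- ---- Python str.count (greedy non-overlapping) vs two disjoint occurrences ----

theorem mrGo_acc (sub : List Char) (fuel : Nat) (l : List Char) (acc : Nat) :
    PySem.Chars.count.go sub fuel l acc = acc + PySem.Chars.count.go sub fuel l 0 := by
  induction fuel generalizing l acc with
  | zero => simp [PySem.Chars.count.go]
  | succ fuel ih =>
    cases l with
    | nil => simp [PySem.Chars.count.go]
    | cons h t =>
      simp only [PySem.Chars.count.go]
      split
      · rw [ih _ (acc + 1), ih _ (0 + 1)]; omega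
      · rw [ih t acc]

theorem mrGo_occ1 (sub : List Char) :
    ∀ (fuel : Nat) (l : List Char), l.length ≤ fuel →
      1 ≤ PySem.Chars.count.go sub fuel l 0 → ∃ j, sub <+: l.drop j := by
  intro fuel
  induction fuel with
  | zero =>
    intro l hl hc; simp [PySem.Chars.count.go] at hc
  | succ fuel ih =>
    intro l hl hc
    cases l with
    | nil => simp [PySem.Chars.count.go] at hc
    | cons h t =>
      simp only [PySem.Chars.count.go] at hc
      split at hc
      · rename_i hp
        exact ⟨0, by simpa using List.isPrefixOf_iff_prefix.mp hp⟩
      · obtain ⟨j, hj⟩ := ih t (by simp only [List.length_cons] at hl; omega) hc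
        exact ⟨j + 1, by simpa using hj⟩

theorem mrGo_occ2 (sub : List Char) (hsub : sub ≠ []) :
    ∀ (fuel : Nat) (l : List Char), l.length ≤ fuel →
      2 ≤ PySem.Chars.count.go sub fuel l 0 → mrOcc2 l sub := by
  intro fuel
  induction fuel with
  | zero =>
    intro l hl hc; simp [PySem.Chars.count.go] at hc
  | succ fuel ih =>
    intro l hl hc
    cases l with
    | nil => simp [PySem.Chars.count.go] at hc
    | cons h t =>
      have hsl : 1 ≤ sub.length := by
        cases sub with | nil => exact absurd rfl hsub | cons a b => simp
      simp only [PySem.Chars.count.go] at hc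
      split at hc
      · rename_i hp
        rw [mrGo_acc] at hc
        have h1 : 1 ≤ PySem.Chars.count.go sub fuel ((h :: t).drop sub.length) 0 := by omega
        have hlen : ((h :: t).drop sub.length).length ≤ fuel := by
          simp only [List.length_drop, List.length_cons]
          simp only [List.length_cons] at hl; omega
        obtain ⟨j, hj⟩ := mrGo_occ1 sub fuel _ hlen h1
        refine ⟨0, sub.length + j, by omega, ?_, ?_⟩
        · simpa using List.isPrefixOf_iff_prefix.mp hp
        · rw [← List.drop_drop]; exact hj
      · obtain ⟨j, k, hjk, hj, hk⟩ := ih t (by simp only [List.length_cons] at hl; omega) hc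
        exact ⟨j + 1, k + 1, by omega, by simpa using hj, by simpa using hk⟩

theorem mrOcc1_go (sub : List Char) (hsub : sub ≠ []) :
    ∀ (fuel : Nat) (l : List Char), l.length ≤ fuel →
      (∃ j, sub <+: l.drop j) → 1 ≤ PySem.Chars.count.go sub fuel l 0 := by
  intro fuel
  induction fuel with
  | zero =>
    intro l hl hj
    obtain ⟨j, hj⟩ := hj
    have hl0 : l = [] := by cases l <;> simp_all
    subst hl0
    simp at hj
    exact absurd hj hsub
  | succ fuel ih =>
    intro l hl hj
    obtain ⟨j, hj⟩ := hj
    cases l with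
    | nil => simp at hj; exact absurd hj hsub
    | cons h t =>
      simp only [PySem.Chars.count.go]
      split
      · rw [mrGo_acc]; omega
      · rename_i hp
        have hj0 : j ≠ 0 := by
          intro h0; subst h0; simp at hj
          exact hp (List.isPrefixOf_iff_prefix.mpr hj)
        apply ih t (by simp only [List.length_cons] at hl; omega)
        refine ⟨j - 1, ?_⟩
        have hdr : (h :: t).drop j = t.drop (j - 1) := by
          cases j with | zero => exact absurd rfl hj0 | succ j' => simp
        rwa [hdr] at hj

theorem mrOcc2_go (sub : List Char) (hsub : sub ≠ []) :
    ∀ (fuel : Nat) (l : List Char), l.length ≤ fuel →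
      mrOcc2 l sub → 2 ≤ PySem.Chars.count.go sub fuel l 0 := by
  intro fuel
  induction fuel with
  | zero =>
    intro l hl hocc
    obtain ⟨j, k, hjk, hj, hk⟩ := hocc
    have hl0 : l = [] := by cases l <;> simp_all
    subst hl0; simp at hj
    exact absurd hj hsub
  | succ fuel ih =>
    intro l hl hocc
    obtain ⟨j, k, hjk, hj, hk⟩ := hocc
    cases l with
    | nil => simp at hj; exact absurd hj hsub
    | cons h t =>
      have hsl : 1 ≤ sub.length := by
        cases sub with | nil => exact absurd rfl hsub | cons a b => simp
      simp only [PySem.Chars.count.go]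
      split
      · rw [mrGo_acc]
        have h1 : 1 ≤ PySem.Chars.count.go sub fuel ((h :: t).drop sub.length) 0 := by
          apply mrOcc1_go sub hsub fuel _
            (by simp only [List.length_drop, List.length_cons]
                simp only [List.length_cons] at hl; omega)
          refine ⟨k - sub.length, ?_⟩
          rw [List.drop_drop]
          have hke : sub.length + (k - sub.length) = k := by omega
          rwa [hke]
        omega
      · rename_i hp
        have hj0 : j ≠ 0 := by
          intro h0; subst h0; simp at hj
          exact hp (List.isPrefixOf_iff_prefix.mpr hj)
        apply ih t (by simp only [List.length_cons] at hl; omega)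
        refine ⟨j - 1, k - 1, by omega, ?_, ?_⟩
        · have hdr : (h :: t).drop j = t.drop (j - 1) := by
            cases j with | zero => exact absurd rfl hj0 | succ j' => simp
          rwa [hdr] at hj
        · have hk0 : k ≠ 0 := by omega
          have hdr : (h :: t).drop k = t.drop (k - 1) := by
            cases k with | zero => exact absurd rfl hk0 | succ k' => simp
          rwa [hdr] at hk

theorem mrCount_two_iff (s sub : List Char) (hsub : sub ≠ []) :
    2 ≤ PySem.Chars.count s sub ↔ mrOcc2 s sub := by
  have hc : PySem.Chars.count s sub = PySem.Chars.count.go sub s.length s 0 := by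
    simp [PySem.Chars.count, hsub]
  rw [hc]
  exact ⟨mrGo_occ2 sub hsub s.length s le_rfl, mrOcc2_go sub hsub s.length s le_rfl⟩

theorem mrCount_nil (s : List Char) : PySem.Chars.count s [] = s.length + 1 := by
  simp [PySem.Chars.count]

-- ---- characterisations of the two inner loops via mrRep ----

theorem mrWin_length (s : List Char) (j L : Nat) (h : j + L ≤ s.length) :
    (mrWin s j L).length = L := by
  simp [mrWin]; omega

theorem mrInner_zero (s : List Char) (h : 1 ≤ s.length) : mrInner s 0 = true := by
  unfold mrInner
  rw [List.any_eq_true]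
  refine ⟨0, PySem.List.mem_pyRange_one.mpr (by constructor <;> omega), ?_⟩
  have hsl : PySem.List.slice s (some ((0:Nat):Int)) (some (((0:Nat):Int) + ((0:Nat):Int))) = (s.drop 0).take 0 :=
    PySem.List.slice_natCast_add s 0 0
  simp only [Nat.cast_zero, add_zero] at hsl
  simp [hsl, mrCount_nil]
  omega

theorem mrInner_pos_iff (s : List Char) (ℓ : Nat) (hℓ : 1 ≤ ℓ) :
    mrInner s (↑ℓ) = true ↔ mrRep s ℓ := by
  unfold mrInner
  rw [List.any_eq_true]
  constructor
  · rintro ⟨i, hmem, hcond⟩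
    rw [PySem.List.mem_pyRange_one] at hmem
    obtain ⟨hi0, hin⟩ := hmem
    obtain ⟨j, rfl⟩ : ∃ j : Nat, i = (j : Int) := ⟨i.toNat, (Int.toNat_of_nonneg hi0).symm⟩
    simp only [Bool.and_eq_true, decide_eq_true_eq] at hcond
    obtain ⟨hjli, hcnt⟩ := hcond
    have hjl : j + ℓ < s.length := by omega
    rw [PySem.List.slice_natCast_add s j ℓ] at hcnt
    have hcnt' : 2 ≤ PySem.Chars.count s (mrWin s j ℓ) := hcnt
    have hwne : mrWin s j ℓ ≠ [] := by
      have hw := mrWin_length s j ℓ (by omega)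
      intro h0; rw [h0] at hw; simp at hw; omega
    obtain ⟨a, b, hab, ha, hb⟩ := (mrCount_two_iff s (mrWin s j ℓ) hwne).mp hcnt'
    rw [mrWin_length s j ℓ (by omega)] at hab
    have hween : mrWin s a ℓ = mrWin s j ℓ := by
      have hpt := List.prefix_iff_eq_take.mp ha
      rw [mrWin_length s j ℓ (by omega)] at hpt
      exact hpt.symm
    have hbn : b + ℓ ≤ s.length := by
      have hlb := hb.length_le
      rw [mrWin_length s j ℓ (by omega)] at hlb
      simp only [List.length_drop] at hlb; omega
    exact ⟨a, b, hab, by rw [hween]; exact hb, by omega⟩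
  · rintro ⟨j, k, hjk, hpre, hbound⟩
    refine ⟨(j : Int), PySem.List.mem_pyRange_one.mpr ⟨by omega, by omega⟩, ?_⟩
    simp only [Bool.and_eq_true, decide_eq_true_eq]
    refine ⟨by omega, ?_⟩
    rw [PySem.List.slice_natCast_add s j ℓ]
    have hwne : mrWin s j ℓ ≠ [] := by
      have hw := mrWin_length s j ℓ (by omega)
      intro h0; rw [h0] at hw; simp at hw; omega
    refine (mrCount_two_iff s (mrWin s j ℓ) hwne).mpr ?_
    refine ⟨j, k, ?_, ?_, hpre⟩
    · rw [mrWin_length s j ℓ (by omega)]; omega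
    · exact List.take_prefix _ _

theorem mrRep_succ (s : List Char) (ℓ : Nat) : mrRep s (ℓ + 1) → mrRep s ℓ := by
  rintro ⟨j, k, hjk, hpre, hbound⟩
  refine ⟨j, k, by omega, ?_, by omega⟩
  have h1 : mrWin s j ℓ <+: mrWin s j (ℓ + 1) := by
    unfold mrWin
    have h2 := List.take_prefix ℓ (List.take (ℓ + 1) (List.drop j s))
    rwa [List.take_take, min_eq_left (by omega)] at h2
  exact h1.trans hpre

theorem mrRep_down (s : List Char) (ℓ d : Nat) : mrRep s (ℓ + d) → mrRep s ℓ := by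
  induction d with
  | zero => exact id
  | succ d ih => intro h; exact ih (mrRep_succ s (ℓ + d) h)

theorem mrAltAny_iff (s : List Char) (ℓ : Nat) :
    ((PySem.List.pyRange 0 ((s.length : Int) - 2 * ↑ℓ + 1)).any (fun i =>
      PySem.Chars.isIn (PySem.List.slice s (some i) (some (i + ↑ℓ)))
        (PySem.List.slice s (some (i + ↑ℓ)) none)) = true) ↔ mrRep s ℓ := by
  rw [List.any_eq_true]
  constructor
  · rintro ⟨i, hmem, hcond⟩
    rw [PySem.List.mem_pyRange_one] at hmem
    obtain ⟨hi0, hin⟩ := hmem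
    obtain ⟨j, rfl⟩ : ∃ j : Nat, i = (j : Int) := ⟨i.toNat, (Int.toNat_of_nonneg hi0).symm⟩
    have hbound : j + 2 * ℓ ≤ s.length := by omega
    rw [PySem.List.slice_natCast_add s j ℓ] at hcond
    rw [show (j : Int) + (ℓ : Int) = ((j + ℓ : Nat) : Int) by push_cast; ring,
        PySem.List.slice_from_natCast] at hcond
    obtain ⟨m, hm⟩ := (PySem.Chars.exists_prefix_drop_iff_isIn _ _).mpr hcond
    rw [List.drop_drop] at hm
    exact ⟨j, j + ℓ + m, by omega, hm, hbound⟩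
  · rintro ⟨j, k, hjk, hpre, hbound⟩
    refine ⟨(j : Int), PySem.List.mem_pyRange_one.mpr ⟨by omega, by omega⟩, ?_⟩
    rw [PySem.List.slice_natCast_add s j ℓ]
    rw [show (j : Int) + (ℓ : Int) = ((j + ℓ : Nat) : Int) by push_cast; ring,
        PySem.List.slice_from_natCast]
    refine (PySem.Chars.exists_prefix_drop_iff_isIn _ _).mp ⟨k - (j + ℓ), ?_⟩
    rw [List.drop_drop]
    have hke : j + ℓ + (k - (j + ℓ)) = k := by omega
    rwa [hke]

-- ===== VERDICT (by name: the statement is the Claim_ definition above) =====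
theorem motif_repeat_spec : Claim_equal_motif_repeat := by
  unfold Claim_equal_motif_repeat Spec_motif_repeat
  intro dna mr _
  set s := dna.toList with hs
  have hA : motif_repeat dna mr = mrLoop s mr ((s.length : Int) - 1) := by
    unfold motif_repeat
    rw [mrLoop_eq, PySem.Str.len_eq]
  by_cases h1 : mr ≥ (s.length : Int) - 1
  · have hB : motif_repeat_alt dna mr = true := by
      simp [motif_repeat_alt, PySem.Str.len_eq, ← hs, h1]
    rw [hA, hB, mrLoop_iff]
    intro L hL1 hL2
    exact absurd hL2 (by omega)
  · by_cases h2 : mr + 1 ≤ 0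
    · have hB : motif_repeat_alt dna mr = decide ((s.length : Int) = 0) := by
        simp [motif_repeat_alt, PySem.Str.len_eq, ← hs, h1, h2]
      by_cases h3 : s.length = 0
      · rw [hA, hB]
        simp only [h3, Nat.cast_zero]
        norm_num
        rw [mrLoop_iff]
        intro L _ _
        unfold mrInner
        rw [List.any_eq_false]
        intro x hx
        rw [PySem.List.mem_pyRange_one] at hx
        exfalso; omega
      · have hAf : mrLoop s mr ((s.length : Int) - 1) = false := by
          cases hb : mrLoop s mr ((s.length : Int) - 1) with
          | false => rfl
          | true =>
            have h0 := (mrLoop_iff s mr ((s.length : Int) - 1)).mp hb 0 (by omega) (by omega)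
            rw [mrInner_zero s (by omega)] at h0
            exact absurd h0 (by simp)
        rw [hA, hAf, hB]
        simp [h3]
    · set ℓ0 : Nat := (mr + 1).toNat with hℓ0
      have hcast : ((ℓ0 : Int)) = mr + 1 := by omega
      have hℓ01 : 1 ≤ ℓ0 := by omega
      have hany_iff : ((PySem.List.pyRange 0 ((s.length : Int) - 2 * (mr + 1) + 1)).any (fun i =>
          PySem.Str.isIn (PySem.Str.slice dna (some i) (some (i + (mr + 1))))
            (PySem.Str.slice dna (some (i + (mr + 1))) none)) = true) ↔ mrRep s ℓ0 := by
        rw [show (mr + 1) = ((ℓ0 : Nat) : Int) from hcast.symm]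
        rw [← mrAltAny_iff s ℓ0]
        have hbe : (fun i => PySem.Str.isIn (PySem.Str.slice dna (some i) (some (i + (ℓ0 : Int))))
            (PySem.Str.slice dna (some (i + (ℓ0 : Int))) none)) = (fun i =>
            PySem.Chars.isIn (PySem.List.slice s (some i) (some (i + (ℓ0 : Int))))
              (PySem.List.slice s (some (i + (ℓ0 : Int))) none)) := by
          funext i
          simp [PySem.Str.toList_slice, ← hs]
        rw [hbe]
      by_cases hrep : mrRep s ℓ0
      · have hB : motif_repeat_alt dna mr = false := by
          have hf := hany_iff.mpr hrep
          simp only [motif_repeat_alt, PySem.Str.len_eq, ← hs, hf, if_neg h1, if_neg h2]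
          simp
        rw [hA, hB]
        cases hb : mrLoop s mr ((s.length : Int) - 1) with
        | false => rfl
        | true =>
          have h0 := (mrLoop_iff s mr ((s.length : Int) - 1)).mp hb ((ℓ0 : Int)) (by omega) (by omega)
          rw [(mrInner_pos_iff s ℓ0 hℓ01).mpr hrep] at h0
          exact absurd h0 (by simp)
      · have hB : motif_repeat_alt dna mr = true := by
          have hf : ((PySem.List.pyRange 0 ((s.length : Int) - 2 * (mr + 1) + 1)).any (fun i =>
              PySem.Str.isIn (PySem.Str.slice dna (some i) (some (i + (mr + 1))))
                (PySem.Str.slice dna (some (i + (mr + 1))) none))) = false := by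
            rw [← Bool.not_eq_true]
            exact fun h => hrep (hany_iff.mp h)
          simp only [motif_repeat_alt, PySem.Str.len_eq, ← hs, hf, if_neg h1, if_neg h2]
          simp
        rw [hA, hB, mrLoop_iff]
        intro L hL1 hL2
        cases hi : mrInner s L with
        | false => rfl
        | true =>
          exfalso
          have hL0 : (1 : Int) ≤ L := by omega
          obtain ⟨ℓ, rfl⟩ : ∃ ℓ : Nat, L = (ℓ : Int) := ⟨L.toNat, (Int.toNat_of_nonneg (by omega)).symm⟩
          have hrepℓ : mrRep s ℓ := (mrInner_pos_iff s ℓ (by omega)).mp hi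
          have : mrRep s ℓ0 := by
            have he : ℓ0 + (ℓ - ℓ0) = ℓ := by omega
            exact mrRep_down s ℓ0 (ℓ - ℓ0) (by rw [he]; exact hrepℓ)
          exact hrep this
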